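-- pv_equiv track=rewrite | github.com/tklab-group/c-four | mypkg/operate_json.py | _convert_lines_to_remove_chunk
-- ===== SOURCE A (Python) =====
-- def _convert_lines_to_remove_chunk(ids, context_id, remove_chunks, remove_chunk_id):
--     start_id = ids.pop(0)
--     prev_id = end_id = start_id
--     ids.append(-1)
--
--     for line_id in ids:
--         if line_id == prev_id + 1:
--             end_id = line_id
--         else:
--             remove_chunks[remove_chunk_id] = {"start_id": start_id, "end_id": end_id, "context_id": context_id}
--             remove_chunk_id += 1
--             start_id = end_id = line_id
--         prev_id = line_id
--
--     return remove_chunk_id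
-- ===== SOURCE B (Python) =====
-- def _convert_lines_to_remove_chunk(ids, context_id, remove_chunks, remove_chunk_id):
--     first = ids.pop(0)
--     ids.append(-1)
--     seq = [first] + ids
--     cut = [i for i, (p, c) in enumerate(zip(seq, seq[1:]), 1) if c != p + 1]
--     for s_i, c in zip([0] + cut, cut):
--         remove_chunks[remove_chunk_id] = {"start_id": seq[s_i], "end_id": seq[c - 1], "context_id": context_id}
--         remove_chunk_id += 1
--     return remove_chunk_id
-- ===== Notes on version B (the rewrite author's own statement) =====
-- stated objective: alternative
-- what changed: B replaces A's single stateful scan (carrying start/prev/end across iterations) by a two-phase decomposition: it first computes the list of cut positions where consecutive numbering breaks in [first]+ids+[-1], then emits one chunk per cut by pairing each cut with the previous one via zip; side effects (pop(0), append(-1), dict writes) are reproduced identically.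
import Mathlib
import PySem

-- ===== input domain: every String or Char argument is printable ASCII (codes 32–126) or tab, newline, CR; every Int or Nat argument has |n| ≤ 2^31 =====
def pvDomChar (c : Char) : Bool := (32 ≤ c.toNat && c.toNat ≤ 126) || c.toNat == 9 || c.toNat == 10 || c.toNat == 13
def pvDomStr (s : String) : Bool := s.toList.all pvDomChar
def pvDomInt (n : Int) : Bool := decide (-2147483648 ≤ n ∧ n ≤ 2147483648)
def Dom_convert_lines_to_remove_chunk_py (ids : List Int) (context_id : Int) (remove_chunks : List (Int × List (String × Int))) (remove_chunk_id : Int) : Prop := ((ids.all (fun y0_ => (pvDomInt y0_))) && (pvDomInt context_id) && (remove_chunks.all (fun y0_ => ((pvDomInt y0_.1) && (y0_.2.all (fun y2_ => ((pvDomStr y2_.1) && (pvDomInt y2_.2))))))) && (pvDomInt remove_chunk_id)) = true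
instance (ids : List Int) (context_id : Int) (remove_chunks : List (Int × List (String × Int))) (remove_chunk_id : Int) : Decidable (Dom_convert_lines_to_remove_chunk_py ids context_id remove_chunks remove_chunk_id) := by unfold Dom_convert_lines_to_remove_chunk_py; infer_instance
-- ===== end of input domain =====

-- ===== PORT A =====
-- B differs only in how it computes (no running state: cut points first, then the chunk loop);
-- return-value equivalence is proved; both Pythons mutate ids and remove_chunks identically (checked in Python, not modelled here).
-- Port of A: fold over ids[1:] ++ [-1] carrying (start_id, prev_id, end_id, remove_chunks, remove_chunk_id).
def convert_lines_to_remove_chunk_py (ids : List Int) (context_id : Int) (remove_chunks : List (Int × List (String × Int))) (remove_chunk_id : Int) : Int :=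
  match ids with
  | [] => 0   -- ids.pop(0) raises IndexError here; excluded by Pre_
  | start_id :: rest =>
    let st := (rest ++ [-1]).foldl
      (fun (s : Int × Int × Int × PySem.Dict Int (List (String × Int)) × Int) line_id =>
        if line_id = s.2.1 + 1 then
          (s.1, line_id, line_id, s.2.2.2.1, s.2.2.2.2)
        else
          (line_id, line_id, line_id,
           s.2.2.2.1.insert s.2.2.2.2
             [("start_id", s.1), ("end_id", s.2.2.1), ("context_id", context_id)],
           s.2.2.2.2 + 1))
      (start_id, start_id, start_id, PySem.Dict.ofList remove_chunks, remove_chunk_id)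
    st.2.2.2.2

-- ===== PORT B =====
-- Port of B: seq = [first] + ids[1:] + [-1]; cut = 1-based indices of non-consecutive adjacent pairs;
-- then one loop over zip([0]+cut, cut) writing chunks. seq[s_i] / seq[c-1]: indices are always in range,
-- so pyGetD with default 0 is exact.
def convert_lines_to_remove_chunk_py_alt (ids : List Int) (context_id : Int) (remove_chunks : List (Int × List (String × Int))) (remove_chunk_id : Int) : Int :=
  match ids with
  | [] => 0   -- ids.pop(0) raises IndexError here; excluded by Pre_
  | first :: rest =>
    let seq := first :: (rest ++ [-1])
    let cut := (PySem.List.enumerate (seq.zip seq.tail) 1).filterMap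
      (fun pc => if pc.2.2 ≠ pc.2.1 + 1 then some pc.1 else none)
    let st := (((0 : Int) :: cut).zip cut).foldl
      (fun (s : PySem.Dict Int (List (String × Int)) × Int) sc =>
        (s.1.insert s.2
          [("start_id", PySem.List.pyGetD seq sc.1 0),
           ("end_id", PySem.List.pyGetD seq (sc.2 - 1) 0),
           ("context_id", context_id)],
         s.2 + 1))
      (PySem.Dict.ofList remove_chunks, remove_chunk_id)
    st.2

-- ===== PRECONDITION & SPEC =====
-- Pre_: A raises IndexError (ids.pop(0)) on an empty ids list; nothing else raises.
def Pre_convert_lines_to_remove_chunk_py (ids : List Int) (context_id : Int) (remove_chunks : List (Int × List (String × Int))) (remove_chunk_id : Int) : Prop := ids ≠ []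
instance (ids : List Int) (context_id : Int) (remove_chunks : List (Int × List (String × Int))) (remove_chunk_id : Int) : Decidable (Pre_convert_lines_to_remove_chunk_py ids context_id remove_chunks remove_chunk_id) := by unfold Pre_convert_lines_to_remove_chunk_py; infer_instance
def pvWitness_convert_lines_to_remove_chunk_py : List Int × Int × (List (Int × List (String × Int))) × Int := ([1, 2, 5], 3, [], 0)
def Spec_convert_lines_to_remove_chunk_py (ids : List Int) (context_id : Int) (remove_chunks : List (Int × List (String × Int))) (remove_chunk_id : Int) (out : Int) : Prop := out = convert_lines_to_remove_chunk_py_alt ids context_id remove_chunks remove_chunk_id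
instance (ids : List Int) (context_id : Int) (remove_chunks : List (Int × List (String × Int))) (remove_chunk_id : Int) (out : Int) : Decidable (Spec_convert_lines_to_remove_chunk_py ids context_id remove_chunks remove_chunk_id out) := by unfold Spec_convert_lines_to_remove_chunk_py; infer_instance

-- ===== CLAIM (what is proved, stated in full; the proofs are below) =====
def Claim_equal_convert_lines_to_remove_chunk_py : Prop := ∀ (ids : List Int) (context_id : Int) (remove_chunks : List (Int × List (String × Int))) (remove_chunk_id : Int), Dom_convert_lines_to_remove_chunk_py ids context_id remove_chunks remove_chunk_id → Pre_convert_lines_to_remove_chunk_py ids context_id remove_chunks remove_chunk_id → Spec_convert_lines_to_remove_chunk_py ids context_id remove_chunks remove_chunk_id (convert_lines_to_remove_chunk_py ids context_id remove_chunks remove_chunk_id)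

-- ===== LEMMAS AND PROOFS =====
-- number of "breaks" (non-consecutive steps) while scanning l with previous value p
def pvBreaks (p : Int) (l : List Int) : Nat :=
  match l with
  | [] => 0
  | x :: xs => (if x = p + 1 then 0 else 1) + pvBreaks x xs

theorem pvA_fold (context_id : Int) (l : List Int) :
    ∀ (a p e : Int) (d : PySem.Dict Int (List (String × Int))) (r : Int),
    (l.foldl
      (fun (s : Int × Int × Int × PySem.Dict Int (List (String × Int)) × Int) line_id =>
        if line_id = s.2.1 + 1 then
          (s.1, line_id, line_id, s.2.2.2.1, s.2.2.2.2)
        else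
          (line_id, line_id, line_id,
           s.2.2.2.1.insert s.2.2.2.2
             [("start_id", s.1), ("end_id", s.2.2.1), ("context_id", context_id)],
           s.2.2.2.2 + 1))
      (a, p, e, d, r)).2.2.2.2 = r + pvBreaks p l := by
  induction l with
  | nil => simp [pvBreaks]
  | cons x xs ih =>
    intro a p e d r
    simp only [List.foldl_cons, pvBreaks]
    by_cases h : x = p + 1 <;> simp [h, ih] <;> try omega

theorem pvB_fold (f : PySem.Dict Int (List (String × Int)) × Int → Int × Int → PySem.Dict Int (List (String × Int)))
    (zl : List (Int × Int)) :
    ∀ (d : PySem.Dict Int (List (String × Int))) (r : Int),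
    (zl.foldl (fun s sc => (f s sc, s.2 + 1)) (d, r)).2 = r + zl.length := by
  induction zl with
  | nil => simp
  | cons x xs ih => intro d r; simp [ih]; omega

theorem pvCut_len (g : Int × Int × Int → Option Int)
    (hg : ∀ i p c, (g (i, p, c)).isSome = (c ≠ p + 1 : Bool)) (l : List Int) :
    ∀ (p : Int) (s : Int),
    ((PySem.List.enumerate ((p :: l).zip l) s).filterMap g).length = pvBreaks p l := by
  induction l with
  | nil => simp [pvBreaks]
  | cons x xs ih =>
    intro p s
    have hz : (p :: x :: xs).zip (x :: xs) = (p, x) :: ((x :: xs).zip xs) := by simp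
    rw [hz, PySem.List.enumerate_cons]
    simp only [List.filterMap_cons]
    have := hg s p x
    by_cases h : x = p + 1
    · have hnone : g (s, p, x) = none := by
        cases hgs : g (s, p, x) with
        | none => rfl
        | some v => rw [hgs] at this; simp [h] at this
      rw [hnone]
      simp [pvBreaks, h, ih]
    · have hsome : (g (s, p, x)).isSome := by rw [this]; simp [h]
      cases hgs : g (s, p, x) with
      | none => rw [hgs] at hsome; simp at hsome
      | some v => simp [pvBreaks, h, ih]; omega

-- ===== VERDICT (by name: the statement is the Claim_ definition above) =====
theorem convert_lines_to_remove_chunk_py_spec : Claim_equal_convert_lines_to_remove_chunk_py := by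
  intro ids context_id remove_chunks remove_chunk_id _ hpre
  unfold Spec_convert_lines_to_remove_chunk_py
  match ids with
  | [] => exact absurd rfl hpre
  | first :: rest =>
    unfold convert_lines_to_remove_chunk_py convert_lines_to_remove_chunk_py_alt
    simp only
    rw [pvA_fold, pvB_fold]
    have htail : (first :: (rest ++ [-1])).tail = rest ++ [-1] := rfl
    have hlen : ∀ (cut : List Int), (((0 : Int) :: cut).zip cut).length = cut.length := by
      intro cut; simp [List.length_zip]
    rw [htail, hlen, pvCut_len (fun pc => if pc.2.2 ≠ pc.2.1 + 1 then some pc.1 else none)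
          (by intro i p c; by_cases h : c = p + 1 <;> simp [h])]
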